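-- pv_equiv track=rewrite | github.com/Ericsson/codechecker | scripts/debug_tools/renew_info_files.py | process_target
-- ===== SOURCE A (Python) =====
-- def process_target(target_str):
--     """
--     Extract target architecture from a string of verbose compiler
--     invocation output.
--     """
--     target_label = "Target:"
--     target_clean = ""
--
--     for line in target_str.splitlines(True):
--         line = line.strip().split()
--         if len(line) > 1 and line[0] == target_label:
--             target_clean = line[1]
--
--     return target_clean
-- ===== SOURCE B (Python) =====
-- def process_target(target_str):
--     """
--     Extract target architecture from a string of verbose compiler
--     invocation output.
--     """
--     for line in reversed(target_str.splitlines(True)):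
--         parts = line.strip().split()
--         if len(parts) > 1 and parts[0] == "Target:":
--             return parts[1]
--     return ""
-- ===== Notes on version B (the rewrite author's own statement) =====
-- stated objective: alternative
-- what changed: Replaces the full forward scan with an overwriting accumulator by a reverse scan that returns the first matching line's second token immediately (early exit).
import Mathlib
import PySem

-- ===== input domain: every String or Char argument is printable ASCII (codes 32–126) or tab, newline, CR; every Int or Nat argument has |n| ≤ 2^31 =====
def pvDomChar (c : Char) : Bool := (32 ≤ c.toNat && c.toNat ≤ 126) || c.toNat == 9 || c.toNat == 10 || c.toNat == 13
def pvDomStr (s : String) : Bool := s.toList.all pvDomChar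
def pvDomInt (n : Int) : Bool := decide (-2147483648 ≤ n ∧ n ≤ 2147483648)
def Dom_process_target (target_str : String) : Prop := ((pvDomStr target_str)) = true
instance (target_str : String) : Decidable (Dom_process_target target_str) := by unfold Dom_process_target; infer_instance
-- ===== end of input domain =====

-- B replaces A's full forward scan with an overwriting accumulator by a reverse scan
-- that returns the first matching line from the end (early exit); same return value.

-- ===== PORT A =====
-- Python's splitlines(True) keeps the line terminators; each line is immediately
-- strip()ped, so PySem.Str.splitlines (which drops terminators) yields the exact
-- same stripped lines — used in both ports for the same reason.
def process_target (target_str : String) : String :=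
  List.foldl
    (fun target_clean line =>
      let parts := PySem.Str.split₀ (PySem.Str.strip line)
      -- len(line) > 1 guarantees line[0] and line[1] exist, so getD is exact here
      if parts.length > 1 ∧ parts.getD 0 "" = "Target:" then parts.getD 1 ""
      else target_clean)
    "" (PySem.Str.splitlines target_str)

-- ===== PORT B =====
-- reverse scan with early exit, as in Source B
def pvScanBack : List String → String
  | [] => ""
  | line :: rest =>
    match PySem.Str.split₀ (PySem.Str.strip line) with
    | w0 :: w1 :: _ => if w0 = "Target:" then w1 else pvScanBack rest
    | _ => pvScanBack rest

def process_target_alt (target_str : String) : String :=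
  pvScanBack (PySem.Str.splitlines target_str).reverse

-- ===== PRECONDITION & SPEC =====
def Spec_process_target (target_str : String) (out : String) : Prop := out = process_target_alt target_str
instance (target_str : String) (out : String) : Decidable (Spec_process_target target_str out) := by unfold Spec_process_target; infer_instance

-- ===== CLAIM (what is proved, stated in full; the proofs are below) =====
def Claim_equal_process_target : Prop := ∀ (target_str : String), Dom_process_target target_str → Spec_process_target target_str (process_target target_str)

-- ===== LEMMAS AND PROOFS =====

-- The forward fold with accumulator equals the reverse early-exit scan,
-- unless no line matches, in which case the fold returns its accumulator
-- and the scan returns "".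
theorem pv_fold_eq_scanBack (l : List String) : ∀ (acc : String),
    List.foldl
      (fun target_clean line =>
        let parts := PySem.Str.split₀ (PySem.Str.strip line)
        if parts.length > 1 ∧ parts.getD 0 "" = "Target:" then parts.getD 1 ""
        else target_clean)
      acc l = pvScanBack l.reverse ∨
    (∀ acc', List.foldl
      (fun target_clean line =>
        let parts := PySem.Str.split₀ (PySem.Str.strip line)
        if parts.length > 1 ∧ parts.getD 0 "" = "Target:" then parts.getD 1 ""
        else target_clean)
      acc' l = acc' ∧ pvScanBack l.reverse = "") := by
  induction l using List.reverseRecOn with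
  | nil => intro acc; right; intro acc'; exact ⟨rfl, rfl⟩
  | append_singleton l x ih =>
    intro acc
    rw [List.foldl_append, List.reverse_append]
    simp only [List.reverse_singleton, List.singleton_append, List.foldl_cons,
      List.foldl_nil, pvScanBack]
    cases h : PySem.Str.split₀ (PySem.Str.strip x) with
    | nil =>
      rcases ih acc with h1 | h1
      · left; exact h1
      · right; intro acc'
        refine ⟨?_, (h1 acc').2⟩
        rw [List.foldl_append]; simp only [List.foldl_cons, List.foldl_nil, h]
        exact (h1 acc').1
    | cons w0 ws =>
      cases ws with
      | nil =>
        rcases ih acc with h1 | h1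
        · left; exact h1
        · right; intro acc'
          refine ⟨?_, (h1 acc').2⟩
          rw [List.foldl_append]; simp only [List.foldl_cons, List.foldl_nil, h]
          exact (h1 acc').1
      | cons w1 rest =>
        by_cases hw : w0 = "Target:"
        · left; simp [hw]
        · have hcond : ¬((w0 :: w1 :: rest).length > 1 ∧
              (w0 :: w1 :: rest).getD 0 "" = "Target:") := by simp [hw]
          rw [if_neg hcond]
          simp only [if_neg hw]
          rcases ih acc with h1 | h1
          · left; exact h1
          · right; intro acc'
            refine ⟨?_, (h1 acc').2⟩
            rw [List.foldl_append]
            simp only [List.foldl_cons, List.foldl_nil, h]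
            rw [if_neg hcond]
            exact (h1 acc').1

-- ===== VERDICT (by name: the statement is the Claim_ definition above) =====
theorem process_target_spec : Claim_equal_process_target := by
  intro target_str _
  unfold Spec_process_target process_target process_target_alt
  rcases pv_fold_eq_scanBack (PySem.Str.splitlines target_str) "" with h | h
  · exact h
  · rw [(h "").1, (h "").2]
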